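-- pv_equiv track=rewrite | github.com/rabiulcste/vqazero | evals/answer_postprocess.py | majority_vote_with_indices_2d
-- ===== SOURCE A (Python) =====
-- from typing import List, Union
--
-- def majority_vote_with_indices_2d(answers: List[List[str]]):
--     results = []
--     indices = []
--     for question_answers in answers:
--         counts = {}
--         for idx, ans in enumerate(question_answers):
--             if not ans:
--                 continue
--             if ans in counts:
--                 counts[ans]["count"] += 1
--                 counts[ans]["indices"].append(idx)
--             else:
--                 counts[ans] = {"count": 1, "indices": [idx]}
--         max_count = max(counts.values(), key=lambda x: x["count"])["count"] if counts else 0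
--         max_ans = [(k, v["indices"]) for k, v in counts.items() if v["count"] == max_count]
--         if max_ans:
--             results.append(max_ans[0][0])
--             indices.append(max_ans[0][1][0])  # Directly append the index of the answer within question_answers
--         else:
--             results.append("")
--             indices.append(0)  # Append 0 or another default value if no answer is found
--
--     return results, indices
-- ===== SOURCE B (Python) =====
-- def majority_vote_with_indices_2d(answers):
--     results = []
--     indices = []
--     for qa in answers:
--         firsts = [a for i, a in enumerate(qa) if a and a not in qa[:i]]
--         if firsts:
--             winner = max(firsts, key=qa.count)
--             results.append(winner)
--             indices.append(qa.index(winner))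
--         else:
--             results.append("")
--             indices.append(0)
--     return results, indices
-- ===== Notes on version B (the rewrite author's own statement) =====
-- stated objective: alternative
-- what changed: B maintains no counting structure at all: it builds the list of distinct non-empty answers via first-occurrence membership scans over prefixes, picks the winner with max(key=qa.count) which recounts by full list scans (Python max keeps the first maximum, matching A's first-inserted tie-break), and recovers the index with a separate .index pass.
import Mathlib
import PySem

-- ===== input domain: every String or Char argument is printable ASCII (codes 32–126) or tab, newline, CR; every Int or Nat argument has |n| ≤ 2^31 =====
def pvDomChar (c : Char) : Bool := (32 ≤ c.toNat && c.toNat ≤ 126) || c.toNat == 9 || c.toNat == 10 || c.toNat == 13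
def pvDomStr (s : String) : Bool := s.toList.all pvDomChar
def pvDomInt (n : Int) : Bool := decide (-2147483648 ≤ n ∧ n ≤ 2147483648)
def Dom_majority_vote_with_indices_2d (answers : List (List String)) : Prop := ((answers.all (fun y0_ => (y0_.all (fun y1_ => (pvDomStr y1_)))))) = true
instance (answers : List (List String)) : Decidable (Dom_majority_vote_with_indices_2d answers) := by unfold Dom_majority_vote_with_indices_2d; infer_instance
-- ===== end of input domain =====

-- B keeps no counting structure: it lists distinct non-empty answers by first-occurrence
-- prefix-membership scans, picks the winner with max(key=qa.count) recounting by full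
-- scans, and recovers the index with a separate .index pass (objective: alternative).

-- ===== PORT A =====
-- one row of A's outer loop: the pair (results-entry, indices-entry) it appends
def pvRowA (question_answers : List String) : String × Int :=
  let counts : PySem.Dict String (Int × List Int) :=
    (PySem.List.enumerate question_answers).foldl (fun d p =>
      if p.2 == "" then d            -- "if not ans: continue"
      else if d.contains p.2 then
        -- counts[ans]["count"] += 1; counts[ans]["indices"].append(idx)  (in-place update)
        d.insert p.2 ((d.getD p.2 (0, [])).1 + 1, (d.getD p.2 (0, [])).2 ++ [p.1])
      else d.insert p.2 (1, [p.1])) PySem.Dict.empty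
  let max_count : Int :=
    if counts.items.isEmpty then 0
    else ((PySem.List.max? counts.values (fun v => v.1)).map (fun v => v.1)).getD 0
  let max_ans := (counts.items.filter (fun kv => kv.2.1 == max_count)).map (fun kv => (kv.1, kv.2.2))
  match max_ans with
  | [] => ("", 0)
  | (k, is) :: _ => (k, (PySem.List.pyGet? is 0).getD 0)  -- is is provably nonempty, so [0] never raises

def majority_vote_with_indices_2d (answers : List (List String)) : List String × List Int :=
  answers.foldl (fun acc qa => (acc.1 ++ [(pvRowA qa).1], acc.2 ++ [(pvRowA qa).2])) ([], [])

-- ===== PORT B =====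
-- one row of B's outer loop
def pvRowB (question_answers : List String) : String × Int :=
  -- firsts = [a for i, a in enumerate(qa) if a and a not in qa[:i]]
  let firsts := ((PySem.List.enumerate question_answers).filter
      (fun p => !(p.2 == "") && !((PySem.List.slice question_answers (some 0) (some p.1)).contains p.2))).map (·.2)
  if !firsts.isEmpty then
    -- max(firsts, key=qa.count): first element with maximal count; qa.index never raises (winner ∈ qa)
    let winner := (PySem.List.max? firsts (fun a => ((PySem.List.count question_answers a : Nat) : Int))).getD ""
    (winner, (((PySem.List.index? question_answers winner).getD 0 : Nat) : Int))
  else ("", 0)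

def majority_vote_with_indices_2d_alt (answers : List (List String)) : List String × List Int :=
  answers.foldl (fun acc qa => (acc.1 ++ [(pvRowB qa).1], acc.2 ++ [(pvRowB qa).2])) ([], [])

-- ===== PRECONDITION & SPEC =====
def Spec_majority_vote_with_indices_2d (answers : List (List String)) (out : List String × List Int) : Prop := out = majority_vote_with_indices_2d_alt answers
instance (answers : List (List String)) (out : List String × List Int) : Decidable (Spec_majority_vote_with_indices_2d answers out) := by unfold Spec_majority_vote_with_indices_2d; infer_instance

-- ===== CLAIM (what is proved, stated in full; the proofs are below) =====
def Claim_equal_majority_vote_with_indices_2d : Prop := ∀ (answers : List (List String)), Dom_majority_vote_with_indices_2d answers → Spec_majority_vote_with_indices_2d answers (majority_vote_with_indices_2d answers)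

-- ===== LEMMAS AND PROOFS =====

theorem pv_max?_map {α β κ : Type} [LT κ] [DecidableLT κ] (f : α → β) (key : β → κ) (xs : List α) :
    PySem.List.max? (xs.map f) key = (PySem.List.max? xs (fun a => key (f a))).map f := by
  unfold PySem.List.max?
  suffices h : ∀ (acc : Option α),
      (xs.map f).foldl (fun acc x => match acc with
        | none => some x
        | some m => if key m < key x then some x else some m) (acc.map f) =
      (xs.foldl (fun acc x => match acc with
        | none => some x
        | some m => if key (f m) < key (f x) then some x else some m) acc).map f by
    simpa using h none
  induction xs with
  | nil => intro acc; simp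
  | cons x t ih =>
    intro acc
    cases acc with
    | none => simpa using ih (some x)
    | some m =>
      simp only [List.map_cons, List.foldl_cons, Option.map_some]
      by_cases h : key (f m) < key (f x)
      · rw [if_pos h, if_pos h]; simpa using ih (some x)
      · rw [if_neg h, if_neg h]; simpa using ih (some m)

theorem pv_max?_aux {α κ : Type} [LinearOrder κ] {key : α → κ} : ∀ (xs : List α) (m0 m : α),
    xs.foldl (fun acc x => match acc with
      | none => some x
      | some m => if key m < key x then some x else some m) (some m0) = some m →
    (m = m0) ∨ (key m0 < key m ∧ ∃ l₁ l₂, xs = l₁ ++ m :: l₂ ∧ (∀ y ∈ l₁, key y < key m)) := by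
  intro xs
  induction xs with
  | nil => intro m0 m h; left; simpa using h.symm
  | cons x t ih =>
    intro m0 m h
    simp only [List.foldl_cons] at h
    by_cases hx : key m0 < key x
    · rw [if_pos hx] at h
      rcases ih x m h with rfl | ⟨hlt, l₁, l₂, rfl, hall⟩
      · right; exact ⟨hx, [], t, rfl, by simp⟩
      · right
        exact ⟨hx.trans hlt, x :: l₁, l₂, rfl, by
          intro y hy; rcases List.mem_cons.1 hy with rfl | hy
          · exact hlt
          · exact hall y hy⟩
    · rw [if_neg hx] at h
      rcases ih m0 m h with rfl | ⟨hlt, l₁, l₂, rfl, hall⟩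
      · left; rfl
      · right
        exact ⟨hlt, x :: l₁, l₂, rfl, by
          intro y hy; rcases List.mem_cons.1 hy with rfl | hy
          · exact lt_of_le_of_lt (not_lt.1 hx) hlt
          · exact hall y hy⟩

theorem pv_max?_decomp {α κ : Type} [LinearOrder κ] {xs : List α} {key : α → κ} {m : α}
    (h : PySem.List.max? xs key = some m) :
    ∃ l₁ l₂, xs = l₁ ++ m :: l₂ ∧ (∀ y ∈ l₁, key y < key m) := by
  cases xs with
  | nil => simp [PySem.List.max?] at h
  | cons x t =>
    unfold PySem.List.max? at h
    simp only [List.foldl_cons] at h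
    rcases pv_max?_aux t x m h with rfl | ⟨hxm, l₁, l₂, rfl, hall⟩
    · exact ⟨[], t, rfl, by simp⟩
    · exact ⟨x :: l₁, l₂, rfl, by
        intro y hy; rcases List.mem_cons.1 hy with rfl | hy
        · exact hxm
        · exact hall y hy⟩

-- max? only looks at the keys of list members: keys equal on members ⇒ same result
theorem pv_max?_congr {α κ : Type} [LT κ] [DecidableLT κ] {k1 k2 : α → κ} :
    ∀ (xs : List α), (∀ x ∈ xs, k1 x = k2 x) → PySem.List.max? xs k1 = PySem.List.max? xs k2 := by
  have aux : ∀ (t : List α) (m0 : α), (∀ x ∈ t, k1 x = k2 x) → k1 m0 = k2 m0 →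
      t.foldl (fun acc x => match acc with
        | none => some x
        | some m => if k1 m < k1 x then some x else some m) (some m0) =
      t.foldl (fun acc x => match acc with
        | none => some x
        | some m => if k2 m < k2 x then some x else some m) (some m0) := by
    intro t
    induction t with
    | nil => intro m0 _ _; rfl
    | cons x r ih =>
      intro m0 h h0
      have hx : k1 x = k2 x := h x (by simp)
      simp only [List.foldl_cons]
      rw [show (if k1 m0 < k1 x then some x else some m0) = (if k2 m0 < k2 x then some x else some m0) by rw [h0, hx]]
      by_cases hc : k2 m0 < k2 x
      · rw [if_pos hc]; exact ih x (fun y hy => h y (by simp [hy])) hx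
      · rw [if_neg hc]; exact ih m0 (fun y hy => h y (by simp [hy])) h0
  intro xs h
  cases xs with
  | nil => rfl
  | cons x t =>
    unfold PySem.List.max?
    simp only [List.foldl_cons]
    exact aux t x (fun y hy => h y (by simp [hy])) (h x (by simp))

theorem pv_getD_A (ws : List (Int × String)) (d : PySem.Dict String (Int × List Int)) (a : String) :
    (ws.foldl (fun d p =>
        d.insert p.2 ((d.getD p.2 ((0 : Int), ([] : List Int))).1 + 1,
                      (d.getD p.2 ((0 : Int), ([] : List Int))).2 ++ [p.1])) d).getD a (0, []) =
      ((d.getD a (0, [])).1 + (((ws.map (·.2)).count a : Nat) : Int),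
       (d.getD a (0, [])).2 ++ (ws.filter (fun p => p.2 == a)).map (·.1)) := by
  induction ws generalizing d with
  | nil => simp
  | cons p t ih =>
    simp only [List.foldl_cons, List.map_cons, List.filter_cons]
    by_cases h : p.2 = a
    · subst h
      rw [ih]
      simp [PySem.Dict.getD_insert_self]
      omega
    · rw [ih]
      rw [PySem.Dict.getD_insert_of_ne _ _ _ (Ne.symm h)]
      simp [List.count_cons, Ne.symm h, h]

theorem pv_enum_filter_snd (g : String → Bool) : ∀ (qa : List String) (s : Int),
    ((PySem.List.enumerate qa s).filter (fun p => g p.2)).map (·.2) = qa.filter g := by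
  intro qa
  induction qa with
  | nil => intro s; simp [PySem.List.enumerate]
  | cons x t ih =>
    intro s
    rw [PySem.List.enumerate_cons]
    by_cases h : g x
    · simp [List.filter_cons, h, ih (s+1)]
    · simp [List.filter_cons, h, ih (s+1)]

theorem pv_enum_index (m : String) : ∀ (qa : List String) (s : Int),
    (((PySem.List.enumerate qa s).filter (fun p => p.2 == m)).map (·.1)).head? =
      (PySem.List.index? qa m).map (fun n => s + (n : Int)) := by
  intro qa
  induction qa with
  | nil => intro s; simp [PySem.List.enumerate, PySem.List.index?]
  | cons x t ih =>
    intro s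
    rw [PySem.List.enumerate_cons]
    by_cases h : x = m
    · subst h
      rw [PySem.List.index?_cons_self]
      simp [List.filter_cons]
    · rw [PySem.List.index?_cons_of_ne _ h]
      simp only [List.filter_cons]
      have hb : ((s, x).2 == m) = false := by simp [h]
      rw [hb]
      simp only [Bool.false_eq_true, if_false, ih (s+1), Option.map_map]
      cases PySem.List.index? t m with
      | none => simp
      | some n => simp; push_cast; ring

-- B's comprehension (in take-form) collects exactly set(filter(bool, qa)), first occurrences in order
theorem pv_firsts_take (qa : List String) :
    ((PySem.List.enumerate qa).filter
        (fun p => !(p.2 == "") && !((qa.take p.1.toNat).contains p.2))).map (·.2)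
      = PySem.Set.ofList (qa.filter (fun a => !(a == ""))) := by
  induction qa using List.reverseRecOn with
  | nil => simp [PySem.List.enumerate]
  | append_singleton t x ih =>
    rw [show PySem.List.enumerate (t ++ [x]) = PySem.List.enumerate (t ++ [x]) 0 from rfl,
      PySem.List.enumerate_append, List.filter_append, List.map_append]
    have ht : (PySem.List.enumerate t 0).filter
          (fun p => !(p.2 == "") && !(((t ++ [x]).take p.1.toNat).contains p.2)) =
        (PySem.List.enumerate t 0).filter
          (fun p => !(p.2 == "") && !((t.take p.1.toNat).contains p.2)) := by
      apply List.filter_congr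
      intro p hp
      rcases (PySem.List.mem_enumerate_iff t 0 p).1 hp with ⟨k, hk, rfl⟩
      have hkk : ((0 : Int) + (k : Int)).toNat = k := by omega
      rw [hkk, List.take_append_of_le_length (le_of_lt hk)]
    rw [ht, ih]
    have hone : PySem.List.enumerate [x] ((0 : Int) + (t.length : Int)) =
        [(((0 : Int) + (t.length : Int)), x)] := by
      rw [PySem.List.enumerate_cons]; rfl
    have htk : ((0 : Int) + (t.length : Int)).toNat = t.length := by omega
    rw [hone, List.filter_append]
    by_cases hx : x = ""
    · subst hx
      simp [PySem.Set.ofList_append]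
    · have hxne : (!(x == "")) = true := by simp [hx]
      have hfx : List.filter (fun a => !(a == "")) [x] = [x] := by simp [hx]
      rw [hfx, PySem.Set.ofList_append_singleton, PySem.Set.add_eq_ite]
      simp only [List.filter_cons, List.filter_nil, hxne, Bool.true_and, htk, List.take_left]
      by_cases hmem : x ∈ t
      · have hcc : (t.contains x) = true := by simpa using hmem
        have hmemS : x ∈ PySem.Set.ofList (t.filter (fun a => !(a == ""))) := by
          rw [PySem.Set.mem_ofList]; exact List.mem_filter.2 ⟨hmem, hxne⟩
        simp [hmemS, hmem]
      · have hcc : (t.contains x) = false := by simpa using hmem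
        have hmemS : x ∉ PySem.Set.ofList (t.filter (fun a => !(a == ""))) := by
          rw [PySem.Set.mem_ofList]
          intro hmm
          exact hmem (List.mem_filter.1 hmm).1
        simp [hmemS, hmem]

-- counting in a filtered list agrees with the original when the element passes the filter
theorem pv_count_filter {α : Type} [DecidableEq α] (p : α → Bool) (l : List α) (a : α)
    (h : p a = true) : (l.filter p).count a = l.count a := by
  induction l with
  | nil => rfl
  | cons x t ih =>
    rw [List.filter_cons]
    by_cases hx : p x = true
    · rw [if_pos hx]
      simp [List.count_cons, ih]
    · rw [if_neg hx]
      have hne : a ≠ x := by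
        intro hh
        rw [hh] at h
        exact hx h
      rw [ih, List.count_cons]
      simp only [beq_iff_eq]
      rw [if_neg (fun hh => hne hh.symm)]
      omega

-- the per-row results coincide
theorem pv_row_eq (qa : List String) : pvRowA qa = pvRowB qa := by
  set xs : List String := qa.filter (fun a => !(a == "")) with hxs
  set ws : List (Int × String) := (PySem.List.enumerate qa).filter (fun p => !(p.2 == "")) with hws
  set S : List String := PySem.Set.ofList xs with hSdef
  set c : String → Int := fun a => ((xs.count a : Nat) : Int) with hc
  set idxs : String → List Int := fun a => (ws.filter (fun p => p.2 == a)).map (·.1) with hidxs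
  -- A's dict
  set dA : PySem.Dict String (Int × List Int) :=
    ws.foldl (fun d p =>
        d.insert p.2 ((d.getD p.2 ((0 : Int), ([] : List Int))).1 + 1,
                      (d.getD p.2 ((0 : Int), ([] : List Int))).2 ++ [p.1])) PySem.Dict.empty with hdA
  have hfoldA : (PySem.List.enumerate qa).foldl (fun d p =>
      if p.2 == "" then d
      else if d.contains p.2 then
        d.insert p.2 ((d.getD p.2 (0, [])).1 + 1, (d.getD p.2 (0, [])).2 ++ [p.1])
      else d.insert p.2 (1, [p.1])) PySem.Dict.empty = dA := by
    rw [hdA, hws, List.foldl_filter]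
    congr 1
    funext d p
    by_cases hp : p.2 = ""
    · simp [hp]
    · have hp' : (p.2 == "") = false := by simp [hp]
      rw [hp']
      simp only [Bool.not_false, if_true, Bool.false_eq_true, if_false]
      by_cases hcont : d.contains p.2
      · simp [hcont]
      · have hcf : d.contains p.2 = false := by simpa using hcont
        simp [hcf, PySem.Dict.getD_of_not_contains d _ hcf]
  have hsnd : ws.map (·.2) = xs := pv_enum_filter_snd (fun a => !(a == "")) qa 0
  have hkeysA : dA.keys = S := by
    rw [hdA, PySem.Dict.keys_foldl_insert_key ws (·.2)
      (fun d p => ((d.getD p.2 ((0 : Int), ([] : List Int))).1 + 1,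
                   (d.getD p.2 ((0 : Int), ([] : List Int))).2 ++ [p.1])) PySem.Dict.empty,
      PySem.Dict.keys_empty, hsnd, hSdef]
    rfl
  have hnodA : dA.keys.Nodup := by
    rw [hdA]
    exact PySem.Dict.nodup_keys_foldl_insert_key ws (·.2) _ _ (by rw [PySem.Dict.keys_empty]; exact List.nodup_nil)
  have hgetA : ∀ a, dA.getD a (0, []) = (c a, idxs a) := by
    intro a
    rw [hdA, pv_getD_A, PySem.Dict.getD_empty, hsnd]
    simp [hc, hidxs]
  have hitems : dA.items = S.map (fun a => (a, (c a, idxs a))) := by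
    rw [PySem.Dict.items_eq_map_keys dA hnodA (0, []), hkeysA]
    exact List.map_congr_left (fun a _ => by rw [hgetA a])
  -- B's comprehension: slice form → take form → S
  have hfirsts : ((PySem.List.enumerate qa).filter
      (fun p => !(p.2 == "") && !((PySem.List.slice qa (some 0) (some p.1)).contains p.2))).map (·.2) = S := by
    have hsl : (PySem.List.enumerate qa).filter
        (fun p => !(p.2 == "") && !((PySem.List.slice qa (some 0) (some p.1)).contains p.2)) =
        (PySem.List.enumerate qa).filter
        (fun p => !(p.2 == "") && !((qa.take p.1.toNat).contains p.2)) := by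
      apply List.filter_congr
      intro p hp
      rcases (PySem.List.mem_enumerate_iff qa 0 p).1 hp with ⟨k, hk, rfl⟩
      have h0 : (0 : Int) ≤ (0 : Int) + (k : Int) := by omega
      rw [PySem.List.slice_zero_start, PySem.List.slice_to qa h0]
    rw [hsl, pv_firsts_take, ← hxs, ← hSdef]
  -- case split on whether any truthy answer exists
  by_cases hS : S = []
  · -- no truthy answers: both return ("", 0)
    have hiA : dA.items = [] := by rw [hitems, hS]; rfl
    rw [pvRowA, pvRowB, hfoldA, hfirsts, hiA, hS]
    simp
  · -- some truthy answer exists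
    obtain ⟨m, hm⟩ : ∃ m, PySem.List.max? S c = some m := by
      cases hmx : PySem.List.max? S c with
      | none => exact absurd ((PySem.List.max?_eq_none_iff S c).mp hmx) hS
      | some m => exact ⟨m, rfl⟩
    have hmS : m ∈ S := PySem.List.max?_mem hm
    have hmxs : m ∈ xs := (PySem.Set.mem_ofList xs m).mp (hSdef ▸ hmS)
    have hmqa : m ∈ qa ∧ m ≠ "" := by
      have := List.mem_filter.mp (hxs ▸ hmxs)
      exact ⟨this.1, by simpa using this.2⟩
    -- B's max key (full-list recount) agrees with c on members of S
    have hkeyS : ∀ a ∈ S, ((PySem.List.count qa a : Nat) : Int) = c a := by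
      intro a ha
      have haxs : a ∈ xs := (PySem.Set.mem_ofList xs a).mp (hSdef ▸ ha)
      have hfa : a ∈ List.filter (fun a => !(a == "")) qa := by rw [← hxs]; exact haxs
      have hane : (!(a == "")) = true := (List.mem_filter.mp hfa).2
      rw [hc]
      have hcount : PySem.List.count qa a = xs.count a := by
        rw [PySem.List.count_eq, hxs, pv_count_filter (fun s => !(s == "")) qa a hane]
      rw [hcount]
    have hmB : PySem.List.max? S (fun a => ((PySem.List.count qa a : Nat) : Int)) = some m := by
      rw [pv_max?_congr S hkeyS]; exact hm
    -- the index list of the winner starts with list.index(winner)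
    obtain ⟨n, hn⟩ : ∃ n, PySem.List.index? qa m = some n :=
      Option.isSome_iff_exists.mp ((PySem.List.index?_isSome_iff qa m).mpr hmqa.1)
    have hidxm : (idxs m).head? = some ((n : Nat) : Int) := by
      rw [hidxs]
      simp only []
      have hff : ws.filter (fun p => p.2 == m) = (PySem.List.enumerate qa).filter (fun p => p.2 == m) := by
        rw [hws, List.filter_filter]
        congr 1
        funext p
        by_cases hp : p.2 = m
        · simp [hp, hmqa.2]
        · simp [hp]
      rw [hff, pv_enum_index m qa 0, hn]
      simp
    obtain ⟨i, t, hit⟩ : ∃ i t, idxs m = i :: t := by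
      cases hl : idxs m with
      | nil => rw [hl] at hidxm; simp at hidxm
      | cons i t => exact ⟨i, t, rfl⟩
    have hi : i = ((n : Nat) : Int) := by rw [hit] at hidxm; simpa using hidxm
    -- A's side
    have hiA : dA.items.isEmpty = false := by
      rw [hitems]
      cases hSc : S with
      | nil => exact absurd hSc hS
      | cons s S' => simp
    have hvalues : dA.values = S.map (fun a => (c a, idxs a)) := by
      show dA.items.map (·.2) = _
      rw [hitems, List.map_map]
      rfl
    have hmaxv : PySem.List.max? dA.values (fun v => v.1) = some (c m, idxs m) := by
      rw [hvalues, pv_max?_map (fun a => (c a, idxs a)) (fun v => v.1) S]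
      simp only []
      rw [hm]
      rfl
    -- decompose S at the winner
    obtain ⟨l₁, l₂, hSplit, hlt⟩ := pv_max?_decomp hm
    have hfilter : S.filter (fun a => c a == c m) = m :: l₂.filter (fun a => c a == c m) := by
      rw [hSplit, List.filter_append]
      have h1 : l₁.filter (fun a => c a == c m) = [] := by
        apply List.filter_eq_nil_iff.mpr
        intro y hy
        simp [ne_of_lt (hlt y hy)]
      rw [h1, List.filter_cons]
      simp
    have hmax_ans : (dA.items.filter (fun kv => kv.2.1 == c m)).map (fun kv => (kv.1, kv.2.2)) =
        (m, idxs m) :: (l₂.filter (fun a => c a == c m)).map (fun a => (a, idxs a)) := by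
      rw [hitems, List.filter_map, List.map_map]
      have : ((fun kv : String × (Int × List Int) => kv.2.1 == c m) ∘ (fun a => (a, (c a, idxs a)))) = (fun a => c a == c m) := rfl
      rw [this, hfilter]
      rfl
    have hSne : S.isEmpty = false := by
      cases hSc : S with
      | nil => exact absurd hSc hS
      | cons s S' => rfl
    -- now compute both sides
    rw [pvRowA, pvRowB, hfoldA, hfirsts]
    simp only [hiA, Bool.false_eq_true, if_false, hSne, Bool.not_false, if_true,
      hmaxv, hmB, Option.map_some, Option.getD_some]
    rw [hmax_ans]
    simp only [Option.map_some, Option.getD_some, hit]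
    have hpg : PySem.List.pyGet? (i :: t) (0 : Int) = some i := by
      simp [PySem.List.pyGet?, PySem.List.pyIdx?]
    rw [hpg, hn]
    simp [hi]

-- ===== VERDICT (by name: the statement is the Claim_ definition above) =====
theorem majority_vote_with_indices_2d_spec : Claim_equal_majority_vote_with_indices_2d := by
  intro answers _
  unfold Spec_majority_vote_with_indices_2d majority_vote_with_indices_2d majority_vote_with_indices_2d_alt
  rw [funext pv_row_eq]
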